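-- pv_equiv track=rewrite | github.com/oyberntzen/testing | keep_talking_and_nobody_explodes/Avverger_v1.py | symboler
-- ===== SOURCE A (Python) =====
-- def symboler(tegn):
--     """0:Ϙ, 1:ƛ, 2:Ѭ, 3:ϗ, 4:Ͽ, 5:Ѧ, 6:Ӭ, 7:Ҩ, 8:☆, 9:¿, 10:©, 11:Ѽ, 12:Җ, 13:Ԇ, 14:ƀ, 15:б, 16:¶, ټ:17, l8:Ͼ, 19:Ѯ, 20:★, 21:Ψ, 22:҂, 23:æ, 24:Ҋ, 25:Ω, 26:Ϟ"""
--     rekker = [[0, 5, 1, 26, 2, 3, 4],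
--               [6, 0, 4, 7, 8, 3, 9],
--               [10, 11, 7, 12, 13, 1, 17],
--               [15, 16, 14, 2, 12, 9, 17],
--               [21, 17, 14, 18, 16, 19, 20],
--               [15, 6, 22, 23, 21, 24, 25]]
--
--     rekke = 0
--     for i in range(len(rekker)):
--         riktig = True
--         for j in tegn:
--             if not j in rekker[i]:
--                 riktig = False
--                 break
--         if riktig:
--             rekke = i
--             break
--
--     rekkefoelge = []
--     for j in range(4):
--         rekord = 0
--         for i in range(len(tegn)):
--             if indekser(rekker[rekke], tegn[i])[0] < indekser(rekker[rekke], tegn[rekord])[0]: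
--                 rekord = i
--         rekkefoelge.append(tegn[rekord])
--         tegn.pop(rekord)
--     return rekkefoelge
--
-- def indekser(liste, maal):
--     tot = []
--     for i in range(len(liste)):
--         if liste[i] == maal:
--             tot.append(i)
--     return tot
-- ===== SOURCE B (Python) =====
-- def symboler(tegn):
--     """0:Ϙ, 1:ƛ, 2:Ѭ, 3:ϗ, 4:Ͽ, 5:Ѧ, 6:Ӭ, 7:Ҩ, 8:☆, 9:¿, 10:©, 11:Ѽ, 12:Җ, 13:Ԇ, 14:ƀ, 15:б, 16:¶, ټ:17, l8:Ͼ, 19:Ѯ, 20:★, 21:Ψ, 22:҂, 23:æ, 24:Ҋ, 25:Ω, 26:Ϟ"""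
--     rekker = [[0, 5, 1, 26, 2, 3, 4],
--               [6, 0, 4, 7, 8, 3, 9],
--               [10, 11, 7, 12, 13, 1, 17],
--               [15, 16, 14, 2, 12, 9, 17],
--               [21, 17, 14, 18, 16, 19, 20],
--               [15, 6, 22, 23, 21, 24, 25]]
--     rekke = next((r for r in rekker if all(j in r for j in tegn)), rekker[0])
--     # one bucket pass: the chosen row's order is the sort order (rows have distinct entries);
--     # the answer is exactly the first four symbols of it
--     a, b, c, d, *_ = [v for x in rekke for v in tegn if v == x]
--     rekkefoelge = [a, b, c, d]
--     for v in rekkefoelge: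
--         tegn.remove(v)
--     return rekkefoelge
-- ===== Notes on version B (the rewrite author's own statement) =====
-- stated objective: simpler
-- what changed: B replaces A's four repeated argmin scans with pops (each rescanning the row via indekser) by a single bucket pass over the chosen row's values in order, taking the first four matches; the row-selection scan is kept.
import Mathlib
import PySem

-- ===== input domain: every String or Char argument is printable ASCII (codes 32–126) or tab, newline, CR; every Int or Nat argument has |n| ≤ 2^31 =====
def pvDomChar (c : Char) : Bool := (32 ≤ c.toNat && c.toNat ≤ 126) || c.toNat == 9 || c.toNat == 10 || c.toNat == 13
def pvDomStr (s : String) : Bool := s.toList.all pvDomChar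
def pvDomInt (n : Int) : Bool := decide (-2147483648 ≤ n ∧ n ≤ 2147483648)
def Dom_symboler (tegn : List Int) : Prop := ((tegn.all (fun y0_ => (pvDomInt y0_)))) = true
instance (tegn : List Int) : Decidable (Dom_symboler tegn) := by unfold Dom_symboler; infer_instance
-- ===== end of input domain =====

-- B replaces A's four argmin-scan-and-pop rounds by a single bucket pass over the chosen row
-- (objective: simpler).  Both Pythons mutate `tegn` identically; the theorems are about the return value.

-- ===== PORT A =====
def pvRekker : List (List Int) :=
  [[0, 5, 1, 26, 2, 3, 4],
   [6, 0, 4, 7, 8, 3, 9],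
   [10, 11, 7, 12, 13, 1, 17],
   [15, 16, 14, 2, 12, 9, 17],
   [21, 17, 14, 18, 16, 19, 20],
   [15, 6, 22, 23, 21, 24, 25]]

def indekser (liste : List Int) (maal : Int) : List Int :=
  (List.range liste.length).foldl
    (fun tot i => if liste.getD i 0 == maal then tot ++ [(i : Int)] else tot) []

-- `for i in range(len(rekker)): … if riktig: rekke = i; break` (rekke stays 0 if no row matches)
def rekkeLoopA : List Nat → List Int → Nat
  | [], _ => 0
  | i :: rest, tegn =>
      if tegn.all (fun j => (pvRekker.getD i []).contains j) then i else rekkeLoopA rest tegn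

-- inner `for i in range(len(tegn))` argmin scan; the first element of `indekser(...)` exists on Pre_ (headD models it there)
def argminA (rad : List Int) (tegn : List Int) : Nat :=
  (List.range tegn.length).foldl
    (fun rekord i =>
      if (indekser rad (tegn.getD i 0)).headD 0 < (indekser rad (tegn.getD rekord 0)).headD 0
      then i else rekord) 0

def symLoopA (rad : List Int) : Nat → List Int → List Int → List Int
  | 0, _, acc => acc
  | n + 1, tegn, acc =>
      let rekord := argminA rad tegn
      symLoopA rad n (tegn.eraseIdx rekord) (acc ++ [tegn.getD rekord 0])

def symboler (tegn : List Int) : List Int :=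
  let rekke := rekkeLoopA (List.range pvRekker.length) tegn
  symLoopA (pvRekker.getD rekke []) 4 tegn []

-- ===== PORT B =====
-- `next(...)` over the rows with the first row as default (same row table as A)
def pickRowB (tegn : List Int) : List Int :=
  match pvRekker.find? (fun r => tegn.all (fun j => r.contains j)) with
  | some r => r
  | none => pvRekker.headD []

-- `a, b, c, d, *_ = [v for x in rekke for v in tegn if v == x]; return [a, b, c, d]`
-- (the `_ => []` arm models the ValueError path — fewer than four matches — which Pre_ excludes)
def symboler_alt (tegn : List Int) : List Int :=
  let rekke := pickRowB tegn
  match rekke.flatMap (fun x => tegn.filter (fun v => v == x)) with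
  | a :: b :: c :: d :: _ => [a, b, c, d]
  | _ => []

-- ===== PRECONDITION & SPEC =====
-- Pre_ is exactly where the Python A returns: at least four symbols, all contained in a single row
-- (otherwise the head of `indekser(...)` or the read of `tegn[rekord]` raises IndexError).
def Pre_symboler (tegn : List Int) : Prop :=
  4 ≤ tegn.length ∧
  ∃ r ∈ ([[0, 5, 1, 26, 2, 3, 4],
          [6, 0, 4, 7, 8, 3, 9],
          [10, 11, 7, 12, 13, 1, 17],
          [15, 16, 14, 2, 12, 9, 17],
          [21, 17, 14, 18, 16, 19, 20],
          [15, 6, 22, 23, 21, 24, 25]] : List (List Int)), ∀ v ∈ tegn, v ∈ r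
instance (tegn : List Int) : Decidable (Pre_symboler tegn) := by unfold Pre_symboler; infer_instance

def pvWitness_symboler : List Int := [0, 5, 1, 26]

def Spec_symboler (tegn : List Int) (out : List Int) : Prop := out = symboler_alt tegn
instance (tegn : List Int) (out : List Int) : Decidable (Spec_symboler tegn out) := by unfold Spec_symboler; infer_instance

-- ===== CLAIM (what is proved, stated in full; the proofs are below) =====
def Claim_equal_symboler : Prop := ∀ (tegn : List Int), Dom_symboler tegn → Pre_symboler tegn → Spec_symboler tegn (symboler tegn)

-- ===== LEMMAS AND PROOFS =====

-- first index of v in rad (meaningful when v ∈ rad)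
def rIdx : List Int → Int → Nat
  | [], _ => 0
  | x :: rs, v => if v = x then 0 else rIdx rs v + 1

def kkey (rad : List Int) (v : Int) : Int := (indekser rad v).headD 0

def bucket (rad tegn : List Int) : List Int :=
  rad.flatMap (fun x => tegn.filter (fun v => v == x))

lemma indekser_eq (liste : List Int) (maal : Int) :
    indekser liste maal =
      ((List.range liste.length).filter (fun i => liste.getD i 0 == maal)).map
        (fun i : Nat => (i : Int)) := by
  unfold indekser
  exact PySem.List.foldl_append_if _ _ _ _

lemma indekser_cons (x : Int) (rs : List Int) (v : Int) :
    indekser (x :: rs) v =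
      (if x = v then [(0 : Int)] else []) ++ (indekser rs v).map (· + 1) := by
  rw [indekser_eq, indekser_eq]
  simp only [List.length_cons, List.range_succ_eq_map, List.filter_cons, List.filter_map,
    List.map_map]
  have hcomp : ((fun i => (x :: rs).getD i 0 == v) ∘ Nat.succ) = (fun i => rs.getD i 0 == v) := by
    funext i; rfl
  rw [hcomp]
  by_cases hxv : x = v
  · simp [hxv]
  · simp [hxv, (beq_iff_eq (a := x) (b := v)).not.mpr hxv]

lemma indekser_ne_nil (rs : List Int) (v : Int) (hv : v ∈ rs) : indekser rs v ≠ [] := by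
  induction rs with
  | nil => cases hv
  | cons x t ih =>
    rw [indekser_cons]
    by_cases hxv : x = v
    · simp [hxv]
    · have hvt : v ∈ t := by cases hv with
        | head => exact absurd rfl hxv
        | tail _ h => exact h
      simp [hxv]
      exact ih hvt

lemma kkey_eq (rad : List Int) (v : Int) (hv : v ∈ rad) :
    kkey rad v = (rIdx rad v : Int) := by
  induction rad with
  | nil => cases hv
  | cons x rs ih =>
    unfold kkey
    rw [indekser_cons]
    by_cases hxv : x = v
    · simp [rIdx, hxv]
    · have hvt : v ∈ rs := by cases hv with
        | head => exact absurd rfl hxv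
        | tail _ h => exact h
      obtain ⟨a, t, hat⟩ := List.exists_cons_of_ne_nil (indekser_ne_nil rs v hvt)
      have ihv := ih hvt
      unfold kkey at ihv
      rw [hat] at ihv ⊢
      simp only [List.headD_cons] at ihv
      have hvx : ¬ v = x := fun h => hxv h.symm
      simp [hxv, hvx, rIdx, ihv]

lemma foldl_argmin (K : Nat → Int) (n : Nat) (h : 1 ≤ n) :
    (List.range n).foldl (fun r i => if K i < K r then i else r) 0 < n ∧
    (∀ i < n, K ((List.range n).foldl (fun r i => if K i < K r then i else r) 0) ≤ K i) ∧
    (∀ i < (List.range n).foldl (fun r i => if K i < K r then i else r) 0,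
      K ((List.range n).foldl (fun r i => if K i < K r then i else r) 0) < K i) := by
  induction n with
  | zero => omega
  | succ n ih =>
    by_cases hn : 1 ≤ n
    · obtain ⟨h1, h2, h3⟩ := ih hn
      rw [List.range_succ, List.foldl_append, List.foldl_cons, List.foldl_nil]
      set r0 := (List.range n).foldl (fun r i => if K i < K r then i else r) 0 with hr0
      by_cases hlt : K n < K r0
      · simp only [if_pos hlt]
        refine ⟨by omega, ?_, ?_⟩
        · intro i hi
          by_cases hin : i < n
          · exact le_of_lt (lt_of_lt_of_le hlt (h2 i hin))
          · have : i = n := by omega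
            simp [this]
        · intro i hi
          exact lt_of_lt_of_le hlt (h2 i hi)
      · simp only [if_neg hlt]
        refine ⟨by omega, ?_, h3⟩
        intro i hi
        by_cases hin : i < n
        · exact h2 i hin
        · have : i = n := by omega
          subst this
          omega
    · have hn0 : n = 0 := by omega
      subst hn0
      simp [List.range_succ]

lemma argminA_spec (rad tegn : List Int) (h : tegn ≠ []) :
    argminA rad tegn < tegn.length ∧
    (∀ i < tegn.length, kkey rad (tegn.getD (argminA rad tegn) 0) ≤ kkey rad (tegn.getD i 0)) ∧
    (∀ i < argminA rad tegn, kkey rad (tegn.getD (argminA rad tegn) 0) < kkey rad (tegn.getD i 0)) := by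
  have hlen : 1 ≤ tegn.length := List.length_pos_iff.mpr h
  have := foldl_argmin (fun i => (indekser rad (tegn.getD i 0)).headD 0) tegn.length hlen
  simpa [argminA, kkey] using this

lemma eraseIdx_eq_erase (l : List Int) (r : Nat) (hr : r < l.length)
    (hfst : ∀ i < r, l.getD i 0 ≠ l.getD r 0) :
    l.eraseIdx r = l.erase (l.getD r 0) := by
  induction l generalizing r with
  | nil => simp at hr
  | cons a t ih =>
    cases r with
    | zero => simp
    | succ r =>
      have ha : a ≠ (a :: t).getD (r + 1) 0 := hfst 0 (by omega)
      have hgd : (a :: t).getD (r + 1) 0 = t.getD r 0 := rfl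
      rw [hgd] at ha
      rw [List.eraseIdx_cons_succ]
      have herase : (a :: t).erase ((a :: t).getD (r + 1) 0) = a :: t.erase (t.getD r 0) := by
        rw [hgd]
        exact List.erase_cons_tail (by simpa [List.getD] using ha)
      rw [herase]
      have := ih r (by simpa using Nat.lt_of_succ_lt_succ hr)
        (fun i hi => by
          have := hfst (i + 1) (by omega)
          simpa [hgd] using this)
      rw [this]

lemma filter_cons_self (tegn : List Int) (m : Int) (hm : m ∈ tegn) :
    tegn.filter (fun v => v == m) = m :: (tegn.erase m).filter (fun v => v == m) := by
  induction tegn with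
  | nil => cases hm
  | cons a t ih =>
    by_cases ham : a = m
    · subst ham
      simp [List.erase_cons_head]
    · have hmt : m ∈ t := by cases hm with
        | head => exact absurd rfl ham
        | tail _ h => exact h
      rw [List.erase_cons_tail (by simp [ham])]
      have hfa : (a :: t).filter (fun v => v == m) = t.filter (fun v => v == m) := by
        simp [List.filter_cons, ham]
      have hfa2 : (a :: t.erase m).filter (fun v => v == m) = (t.erase m).filter (fun v => v == m) := by
        simp [List.filter_cons, ham]
      rw [hfa, hfa2]
      exact ih hmt

lemma filter_erase_ne (tegn : List Int) (m y : Int) (h : y ≠ m) :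
    (tegn.erase m).filter (fun v => v == y) = tegn.filter (fun v => v == y) := by
  induction tegn with
  | nil => rfl
  | cons a t ih =>
    by_cases ham : a = m
    · subst ham
      rw [List.erase_cons_head]
      have : ¬ (a = y) := fun hh => h (hh.symm)
      simp [List.filter_cons, this]
    · rw [List.erase_cons_tail (by simp [ham])]
      simp only [List.filter_cons]
      rw [ih]

lemma bucket_congr (rs t1 t2 : List Int)
    (h : ∀ y ∈ rs, t1.filter (fun v => v == y) = t2.filter (fun v => v == y)) :
    bucket rs t1 = bucket rs t2 := by
  induction rs with
  | nil => rfl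
  | cons x r ih =>
    simp only [bucket, List.flatMap_cons]
    rw [h x List.mem_cons_self]
    have := ih (fun y hy => h y (List.mem_cons_of_mem _ hy))
    simp only [bucket] at this
    rw [this]

lemma rIdx_cons_ne (x v : Int) (rs : List Int) (h : v ≠ x) :
    rIdx (x :: rs) v = rIdx rs v + 1 := by
  simp [rIdx, h]

lemma bucket_step : ∀ (rad : List Int), rad.Nodup → ∀ (tegn : List Int) (m : Int),
    (∀ v ∈ tegn, v ∈ rad) → m ∈ tegn → (∀ v ∈ tegn, rIdx rad m ≤ rIdx rad v) →
    bucket rad tegn = m :: bucket rad (tegn.erase m) := by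
  intro rad
  induction rad with
  | nil => intro _ tegn m hsub hm _; exact absurd (hsub m hm) (by simp)
  | cons x rs ih =>
    intro hnd tegn m hsub hm hmin
    simp only [bucket, List.flatMap_cons]
    by_cases hxm : x = m
    · subst hxm
      have hrest : bucket rs tegn = bucket rs (tegn.erase x) := by
        apply bucket_congr
        intro y hy
        have hyx : y ≠ x := fun hh => (by simp at hnd; exact hnd.1 (hh ▸ hy))
        exact (filter_erase_ne tegn x y hyx).symm
      rw [filter_cons_self tegn x hm]
      simp only [bucket] at hrest
      rw [hrest]
      rfl
    · have hmx : m ≠ x := fun hh => hxm hh.symm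
      have hx : x ∉ tegn := by
        intro hxin
        have h1 := hmin x hxin
        rw [rIdx_cons_ne x m rs hmx] at h1
        simp [rIdx] at h1
      have hf1 : tegn.filter (fun v => v == x) = [] := by
        apply List.filter_eq_nil_iff.mpr
        intro v hv
        simp only [beq_iff_eq, decide_eq_true_eq]
        exact fun hh => hx (hh ▸ hv)
      have hf2 : (tegn.erase m).filter (fun v => v == x) = [] := by
        apply List.filter_eq_nil_iff.mpr
        intro v hv
        simp only [beq_iff_eq, decide_eq_true_eq]
        exact fun hh => hx (hh ▸ (List.mem_of_mem_erase hv))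
      have hstep := ih (List.Nodup.of_cons hnd) tegn m
        (fun v hv => by
          have hvx : v ≠ x := fun hh => hx (hh ▸ hv)
          cases hsub v hv with
          | head => exact absurd rfl hvx
          | tail _ h => exact h)
        hm
        (fun v hv => by
          have h1 := hmin v hv
          have hvx : v ≠ x := fun hh => hx (hh ▸ hv)
          rw [rIdx_cons_ne x m rs hmx, rIdx_cons_ne x v rs hvx] at h1
          omega)
      simp only [bucket] at hstep
      rw [hf1, hf2, List.nil_append, List.nil_append, hstep]

lemma argmin_facts (rad tegn : List Int) (hne : tegn ≠ []) (hsub : ∀ v ∈ tegn, v ∈ rad) :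
    tegn.getD (argminA rad tegn) 0 ∈ tegn ∧
    tegn.eraseIdx (argminA rad tegn) = tegn.erase (tegn.getD (argminA rad tegn) 0) ∧
    (rad.Nodup → bucket rad tegn =
      tegn.getD (argminA rad tegn) 0 :: bucket rad (tegn.erase (tegn.getD (argminA rad tegn) 0))) := by
  obtain ⟨hlt, hle, hstrict⟩ := argminA_spec rad tegn hne
  set r := argminA rad tegn with hr
  set m := tegn.getD r 0 with hm
  have hmmem : m ∈ tegn := by
    rw [hm, List.getD_eq_getElem _ _ hlt]
    exact List.getElem_mem hlt
  have hmin : ∀ v ∈ tegn, rIdx rad m ≤ rIdx rad v := by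
    intro v hv
    obtain ⟨i, hi, rfl⟩ := List.mem_iff_getElem.mp hv
    have h1 := hle i hi
    have hgd : tegn.getD i 0 = tegn[i] := List.getD_eq_getElem _ _ hi
    rw [hgd, kkey_eq rad m (hsub m hmmem), kkey_eq rad tegn[i] (hsub _ (List.getElem_mem hi))] at h1
    exact_mod_cast h1
  have hfst : ∀ i < r, tegn.getD i 0 ≠ m := by
    intro i hi heq
    have := hstrict i hi
    rw [heq] at this
    exact lt_irrefl _ this
  exact ⟨hmmem, eraseIdx_eq_erase tegn r hlt hfst,
    fun hnd => bucket_step rad hnd tegn m hsub hmmem hmin⟩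

lemma symLoop_eq (rad : List Int) (hnd : rad.Nodup) :
    ∀ n (tegn acc : List Int), n ≤ tegn.length → (∀ v ∈ tegn, v ∈ rad) →
      symLoopA rad n tegn acc = acc ++ (bucket rad tegn).take n := by
  intro n
  induction n with
  | zero => intro tegn acc _ _; simp [symLoopA]
  | succ n ih =>
    intro tegn acc hlen hsub
    have hne : tegn ≠ [] := by
      intro hh; rw [hh] at hlen; simp at hlen
    obtain ⟨hmmem, herase, hb⟩ := argmin_facts rad tegn hne hsub
    set r := argminA rad tegn with hr
    set m := tegn.getD r 0 with hm
    show symLoopA rad n (tegn.eraseIdx r) (acc ++ [m]) = acc ++ (bucket rad tegn).take (n + 1)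
    rw [herase]
    rw [ih (tegn.erase m) (acc ++ [m])
      (by rw [List.length_erase_of_mem hmmem]; omega)
      (fun v hv => hsub v (List.mem_of_mem_erase hv))]
    rw [hb hnd, List.take_succ_cons, List.append_assoc]
    rfl

lemma bucket_long (rad : List Int) (hnd : rad.Nodup) :
    ∀ n (tegn : List Int), n ≤ tegn.length → (∀ v ∈ tegn, v ∈ rad) →
      n ≤ (bucket rad tegn).length := by
  intro n
  induction n with
  | zero => intro tegn _ _; omega
  | succ n ih =>
    intro tegn hlen hsub
    have hne : tegn ≠ [] := by
      intro hh; rw [hh] at hlen; simp at hlen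
    obtain ⟨hmmem, _, hb⟩ := argmin_facts rad tegn hne hsub
    rw [hb hnd]
    simp only [List.length_cons]
    have := ih (tegn.erase (tegn.getD (argminA rad tegn) 0))
      (by rw [List.length_erase_of_mem hmmem]; omega)
      (fun v hv => hsub v (List.mem_of_mem_erase hv))
    omega

lemma row_eq (tegn : List Int) :
    pvRekker.getD (rekkeLoopA (List.range pvRekker.length) tegn) [] = pickRowB tegn := by
  have hrange : List.range pvRekker.length = [0, 1, 2, 3, 4, 5] := rfl
  rw [hrange]
  simp only [rekkeLoopA, pickRowB, pvRekker, pvRekker, List.find?, List.getD,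
    List.getElem?_cons_zero, List.getElem?_cons_succ, Option.getD_some]
  cases hc0 : (tegn.all fun j => ([0, 5, 1, 26, 2, 3, 4] : List Int).contains j) <;>
    simp only [hc0] <;>
  (try rfl) <;>
  cases hc1 : (tegn.all fun j => ([6, 0, 4, 7, 8, 3, 9] : List Int).contains j) <;>
    simp only [hc1] <;>
  (try rfl) <;>
  cases hc2 : (tegn.all fun j => ([10, 11, 7, 12, 13, 1, 17] : List Int).contains j) <;>
    simp only [hc2] <;>
  (try rfl) <;>
  cases hc3 : (tegn.all fun j => ([15, 16, 14, 2, 12, 9, 17] : List Int).contains j) <;>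
    simp only [hc3] <;>
  (try rfl) <;>
  cases hc4 : (tegn.all fun j => ([21, 17, 14, 18, 16, 19, 20] : List Int).contains j) <;>
    simp only [hc4] <;>
  (try rfl) <;>
  cases hc5 : (tegn.all fun j => ([15, 6, 22, 23, 21, 24, 25] : List Int).contains j) <;>
    simp only [hc5] <;> rfl

lemma pickRow_mem (tegn : List Int)
    (h : ∃ r ∈ pvRekker, ∀ v ∈ tegn, v ∈ r) :
    ∀ v ∈ tegn, v ∈ pickRowB tegn := by
  unfold pickRowB
  cases hf : pvRekker.find? (fun r => tegn.all fun j => r.contains j) with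
  | some r =>
    have hp := List.find?_some hf
    intro v hv
    exact List.contains_iff_mem.mp (List.all_eq_true.mp hp v hv)
  | none =>
    exfalso
    obtain ⟨r, hr, hall⟩ := h
    have := List.find?_eq_none.mp hf r hr
    exact this (List.all_eq_true.mpr (fun v hv => List.contains_iff_mem.mpr (hall v hv)))

lemma pickRowB_nodup (tegn : List Int) : (pickRowB tegn).Nodup := by
  unfold pickRowB
  cases h : pvRekker.find? (fun r => tegn.all fun j => r.contains j) with
  | none => decide
  | some r =>
    have := List.mem_of_find?_eq_some h
    simp only [pvRekker, List.mem_cons, List.not_mem_nil, or_false] at this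
    rcases this with rfl | rfl | rfl | rfl | rfl | rfl
    · decide
    · decide
    · decide
    · decide
    · decide
    · decide

-- ===== VERDICT (by name: the statement is the Claim_ definition above) =====
theorem symboler_spec : Claim_equal_symboler := by
  intro tegn _ hpre
  obtain ⟨h4, hex⟩ := hpre
  have hex' : ∃ r ∈ pvRekker, ∀ v ∈ tegn, v ∈ r := hex
  have heq := row_eq tegn
  have hmem := pickRow_mem tegn hex'
  show symboler tegn = symboler_alt tegn
  have hsym : symboler tegn =
      symLoopA (pvRekker.getD (rekkeLoopA (List.range pvRekker.length) tegn) []) 4 tegn [] := rfl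
  rw [hsym, heq]
  rw [symLoop_eq (pickRowB tegn) (pickRowB_nodup tegn) 4 tegn [] h4 hmem]
  have h4b := bucket_long (pickRowB tegn) (pickRowB_nodup tegn) 4 tegn h4 hmem
  simp only [bucket] at h4b ⊢
  have halt : symboler_alt tegn =
      match (pickRowB tegn).flatMap (fun x => tegn.filter (fun v => v == x)) with
      | a :: b :: c :: d :: _ => [a, b, c, d]
      | _ => [] := rfl
  rw [halt]
  rcases hBv : (pickRowB tegn).flatMap (fun x => tegn.filter (fun v => v == x)) with
    _ | ⟨a, _ | ⟨b, _ | ⟨c, _ | ⟨d, rest⟩⟩⟩⟩ <;>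
    rw [hBv] at h4b <;> simp at h4b ⊢
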